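-- pv_equiv track=rewrite | github.com/themillipede/data-structures-and-algorithms | algorithms_on_strings/PA2_burrows-wheeler_transform_and_suffix_arrays/3_bwmatching.py | preprocess_bwt
-- ===== SOURCE A (Python) =====
-- def preprocess_bwt(bwt):
--     """
--     Preprocess the Burrows-Wheeler transform, bwt, of some text and compute as a result:
--     - starts: for each character C in bwt, starts[C] is the first position of that character in the
--       sorted array of all characters of the text.
--     - occ_counts_before: for each character C in bwt and each position P in bwt, occ_count_before[C][P]
--       is the number of occurrences of character C in bwt from position 0 to position P inclusive.
--     """
--     first_column = sorted(bwt)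
--     starts = {}
--     last_char = None
--     for i, char in enumerate(first_column):
--         if char != last_char:
--             starts[char] = i
--             last_char = char
--     occ_counts_before = {c: {i: 0 for i in range(len(bwt) + 1)} for c in starts}
--
--     for i, char in enumerate(bwt, start=1):
--         occ_counts_before[char][i] = occ_counts_before[char][i - 1] + 1
--         for c in starts:
--             if c != char:
--                 occ_counts_before[c][i] = occ_counts_before[c][i - 1]
--
--     return starts, occ_counts_before
-- ===== SOURCE B (Python) =====
-- def preprocess_bwt(bwt):
--     """Counting-sort preprocessing: derive starts from character counts (no full sort
--     of bwt) and build each occurrence column in its own single pass."""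
--     counts = {}
--     for ch in bwt:
--         counts[ch] = counts.get(ch, 0) + 1
--     starts = {}
--     total = 0
--     for c in sorted(counts):
--         starts[c] = total
--         total += counts[c]
--     occ_counts_before = {}
--     for c in starts:
--         col = {0: 0}
--         cnt = 0
--         for i, ch in enumerate(bwt, start=1):
--             if ch == c:
--                 cnt += 1
--             col[i] = cnt
--         occ_counts_before[c] = col
--     return starts, occ_counts_before
-- ===== Notes on version B (the rewrite author's own statement) =====
-- stated objective: faster
-- what changed: starts is derived from a character Counter plus a cumulative sum over the sorted distinct characters (counting sort) instead of sorting the whole bwt, and each occurrence column is built in its own single append-only pass instead of updating every character's column at every position.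
import Mathlib
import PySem

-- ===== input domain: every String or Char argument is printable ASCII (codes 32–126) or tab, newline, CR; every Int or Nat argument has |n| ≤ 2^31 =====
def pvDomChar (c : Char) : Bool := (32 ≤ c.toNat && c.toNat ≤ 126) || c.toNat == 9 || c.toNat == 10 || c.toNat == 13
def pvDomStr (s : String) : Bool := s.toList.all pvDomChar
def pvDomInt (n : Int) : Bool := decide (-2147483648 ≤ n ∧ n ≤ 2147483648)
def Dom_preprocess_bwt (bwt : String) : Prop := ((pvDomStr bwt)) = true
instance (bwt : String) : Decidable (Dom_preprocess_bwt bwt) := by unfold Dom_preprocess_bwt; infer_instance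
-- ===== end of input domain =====

-- B sorts only the distinct characters (counting sort for starts) and builds each
-- occurrence column in its own single pass; measured faster than A by a constant factor.

-- ===== PORT A =====
def preprocess_bwt (bwt : String) : (List (String × Int)) × (List (String × List (Int × Int))) :=
  let chars := bwt.toList
  let first_column := PySem.List.sorted chars (fun c => c) false
  let st := (PySem.List.enumerate first_column 0).foldl
      (fun (st : PySem.Dict String Int × Option Char) p =>
        if some p.2 ≠ st.2 then (st.1.insert (String.ofList [p.2]) p.1, some p.2) else st)
      (PySem.Dict.empty, none)
  let starts := st.1
  let occ0 : PySem.Dict String (PySem.Dict Int Int) :=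
    starts.keys.foldl
      (fun d c => d.insert c (PySem.Dict.ofList
        ((PySem.List.pyRange 0 ((chars.length : Int) + 1) 1).map (fun i => (i, (0 : Int))))))
      PySem.Dict.empty
  let occ := (PySem.List.enumerate chars 1).foldl
      (fun occ p =>
        let occ1 := occ.modify (String.ofList [p.2]) PySem.Dict.empty
          (fun col => col.insert p.1 (col.getD (p.1 - 1) 0 + 1))
        starts.keys.foldl
          (fun occ2 c =>
            if c ≠ String.ofList [p.2] then
              occ2.modify c PySem.Dict.empty (fun col => col.insert p.1 (col.getD (p.1 - 1) 0))
            else occ2) occ1)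
      occ0
  (starts.items, occ.items.map (fun q => (q.1, q.2.items)))

-- ===== PORT B =====
def preprocess_bwt_alt (bwt : String) : (List (String × Int)) × (List (String × List (Int × Int))) :=
  let chars := bwt.toList
  let counts := chars.foldl (fun d ch => d.insert ch (d.getD ch 0 + 1))
      (PySem.Dict.empty : PySem.Dict Char Int)
  let st := (PySem.List.sorted counts.keys (fun c => c) false).foldl
      (fun (st : PySem.Dict String Int × Int) c =>
        (st.1.insert (String.ofList [c]) st.2, st.2 + counts.getD c 0))
      (PySem.Dict.empty, 0)
  let starts := st.1
  let occ := starts.keys.foldl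
      (fun occd cs =>
        let colcnt := (PySem.List.enumerate chars 1).foldl
            (fun (q : PySem.Dict Int Int × Int) p =>
              let cnt := if String.ofList [p.2] = cs then q.2 + 1 else q.2
              (q.1.insert p.1 cnt, cnt))
            (PySem.Dict.ofList [((0 : Int), (0 : Int))], 0)
        occd.insert cs colcnt.1)
      (PySem.Dict.empty : PySem.Dict String (PySem.Dict Int Int))
  (starts.items, occ.items.map (fun q => (q.1, q.2.items)))

-- ===== PRECONDITION & SPEC =====
def Spec_preprocess_bwt (bwt : String) (out : (List (String × Int)) × (List (String × List (Int × Int)))) : Prop := out = preprocess_bwt_alt bwt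
instance (bwt : String) (out : (List (String × Int)) × (List (String × List (Int × Int)))) : Decidable (Spec_preprocess_bwt bwt out) := by unfold Spec_preprocess_bwt; infer_instance

-- ===== CLAIM (what is proved, stated in full; the proofs are below) =====
def Claim_equal_preprocess_bwt : Prop := ∀ (bwt : String), Dom_preprocess_bwt bwt → Spec_preprocess_bwt bwt (preprocess_bwt bwt)

-- ===== LEMMAS AND PROOFS =====

-- single-character strings
theorem ofList_single_inj {c d : Char} (h : String.ofList [c] = String.ofList [d]) : c = d := by
  have := congrArg String.toList h; simp at this; exact this

-- `Dd seen t` : first occurrences of t that are not in `seen`, in order (spec of Set.ofList)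
def Dd : List Char → List Char → List Char
  | _, [] => []
  | seen, x :: t => if x ∈ seen then Dd seen t else x :: Dd (seen ++ [x]) t

theorem foldl_add_eq_append_Dd (t : List Char) : ∀ (s : List Char),
    List.foldl PySem.Set.add s t = s ++ Dd s t := by
  induction t with
  | nil => intro s; simp [Dd]
  | cons x t ih =>
      intro s
      by_cases hx : x ∈ s
      · have hc : PySem.Set.contains s x = true := (PySem.Set.contains_iff s x).mpr hx
        simp [Dd, hx, PySem.Set.add, ih]
      · have hc : PySem.Set.contains s x = false := by
          by_contra h
          exact hx ((PySem.Set.contains_iff s x).mp (by simpa using h))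
        simp [Dd, hx, PySem.Set.add, ih]

theorem dedup_eq_Dd (t : List Char) : PySem.List.dedup t = Dd [] t := by
  have h := foldl_add_eq_append_Dd t []
  simpa [PySem.List.dedup, PySem.Set.ofList, PySem.Set.empty] using h

theorem Dd_congr (t : List Char) : ∀ s s', (∀ x ∈ t, (x ∈ s ↔ x ∈ s')) → Dd s t = Dd s' t := by
  induction t with
  | nil => intro s s' _; simp [Dd]
  | cons x t ih =>
      intro s s' h
      have hx := h x (by simp)
      by_cases hxs : x ∈ s
      · simp [Dd, hxs, hx.mp hxs, ih s s' (fun y hy => h y (by simp [hy]))]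
      · have hxs' : x ∉ s' := fun hh => hxs (hx.mpr hh)
        simp only [Dd, if_neg hxs, if_neg hxs']
        refine congrArg _ (ih _ _ ?_)
        intro y hy; simp [h y (by simp [hy])]

theorem Dd_replicate_skip (k : Nat) (c : Char) (r : List Char) (s : List Char) (hc : c ∈ s) :
    Dd s (List.replicate k c ++ r) = Dd s r := by
  induction k with
  | zero => simp
  | succ k ih => simpa [Dd, List.replicate_succ, hc] using ih

theorem Dd_sublist (t : List Char) : ∀ s, (Dd s t).Sublist t := by
  induction t with
  | nil => intro s; simp [Dd]
  | cons x t ih =>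
      intro s
      by_cases hx : x ∈ s
      · simp only [Dd, if_pos hx]
        exact (ih s).cons x
      · simp only [Dd, if_neg hx]
        exact (ih (s ++ [x])).cons₂ x

theorem dedup_run (c : Char) (k : Nat) (r : List Char) (hc : c ∉ r) :
    PySem.List.dedup (c :: (List.replicate k c ++ r)) = c :: PySem.List.dedup r := by
  rw [dedup_eq_Dd, dedup_eq_Dd]
  have h1 : Dd [] (c :: (List.replicate k c ++ r)) = c :: Dd [c] (List.replicate k c ++ r) := by
    simp [Dd]
  rw [h1, Dd_replicate_skip k c r [c] (by simp)]
  refine congrArg _ (Dd_congr r [c] [] ?_)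
  intro x hx
  simp only [List.mem_singleton, List.not_mem_nil, iff_false]
  exact fun hxc => hc (hxc ▸ hx)

theorem dedup_pairwise_lt (m : List Char) (hm : m.Pairwise (· ≤ ·)) :
    (PySem.List.dedup m).Pairwise (· < ·) := by
  have hsub : (PySem.List.dedup m).Sublist m := by
    rw [dedup_eq_Dd]; exact Dd_sublist m []
  have hle : (PySem.List.dedup m).Pairwise (· ≤ ·) := hm.sublist hsub
  have hnd : (PySem.List.dedup m).Nodup := PySem.Set.nodup_ofList m
  have := hle.and hnd
  exact this.imp (fun {a b} h => lt_of_le_of_ne h.1 h.2)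

-- starts as a function of the sorted column (port A) …
def Gs : List Char → Int → Option Char → List (String × Int)
  | [], _, _ => []
  | c :: t, i, last =>
      if some c ≠ last then (String.ofList [c], i) :: Gs t (i + 1) (some c) else Gs t (i + 1) last

-- … and as a function of the sorted distinct characters and their counts (port B)
def Hs (cnt : Char → Int) : List Char → Int → List (String × Int)
  | [], _ => []
  | c :: ks, t => (String.ofList [c], t) :: Hs cnt ks (t + cnt c)

theorem Hs_congr (f g : Char → Int) (ks : List Char) (h : ∀ c ∈ ks, f c = g c) :
    ∀ t, Hs f ks t = Hs g ks t := by
  induction ks with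
  | nil => intro t; simp [Hs]
  | cons c ks ih =>
      intro t
      have hc := h c (by simp)
      simp only [Hs, hc]
      exact congrArg _ (ih (fun x hx => h x (by simp [hx])) _)

theorem Hs_map_fst (cnt : Char → Int) (ks : List Char) :
    ∀ t, (Hs cnt ks t).map (·.1) = ks.map (fun c => String.ofList [c]) := by
  induction ks with
  | nil => intro t; simp [Hs]
  | cons c ks ih => intro t; simp [Hs, ih]

theorem Gs_replicate (k : Nat) (c : Char) (r : List Char) :
    ∀ i, Gs (List.replicate k c ++ r) i (some c) = Gs r (i + (k : Int)) (some c) := by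
  induction k with
  | zero => intro i; simp
  | succ k ih =>
      intro i
      have : ((k : Int) + 1) = ((k + 1 : Nat) : Int) := by push_cast; ring
      simp only [List.replicate_succ, List.cons_append, Gs, ne_eq, not_true_eq_false,
        if_false, ih (i + 1)]
      congr 1
      push_cast; ring

theorem Gs_fresh (r : List Char) (c : Char) (h : ∀ x ∈ r, x ≠ c) (i : Int) :
    Gs r i (some c) = Gs r i none := by
  cases r with
  | nil => simp [Gs]
  | cons d r' =>
      have hd : d ≠ c := h d (by simp)
      simp [Gs, hd]

theorem Gs_eq_Hs_aux : ∀ (n : Nat) (m : List Char), m.length ≤ n → m.Pairwise (· ≤ ·) →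
    ∀ i, Gs m i none = Hs (fun c => (m.count c : Int)) (PySem.List.dedup m) i := by
  intro n
  induction n with
  | zero =>
      intro m hlen _ i
      have hm0 : m = [] := List.eq_nil_of_length_eq_zero (Nat.le_zero.mp hlen)
      subst hm0
      simp [Gs, Hs]
  | succ n ih =>
      intro m hlen hm i
      match m with
      | [] => simp [Gs, Hs]
      | c :: t =>
        have hle : ∀ x ∈ t, c ≤ x := (List.pairwise_cons.mp hm).1
        have ht : t.Pairwise (· ≤ ·) := (List.pairwise_cons.mp hm).2
        set tw := t.takeWhile (fun x => x == c) with htw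
        set r := t.dropWhile (fun x => x == c) with hrdef
        have htdr : tw ++ r = t := List.takeWhile_append_dropWhile
        have hrep : tw = List.replicate tw.length c := by
          rw [List.eq_replicate_iff]
          exact ⟨rfl, fun b hb => by simpa using List.mem_takeWhile_imp hb⟩
        have hrpw : r.Pairwise (· ≤ ·) := ht.sublist (List.dropWhile_sublist _)
        have hrne : ∀ x ∈ r, x ≠ c := by
          intro x hx
          cases hr : r with
          | nil => rw [hr] at hx; simp at hx
          | cons d r' =>
            have hd : (d == c) = false := by
              have hh := List.head?_dropWhile_not (fun x => x == c) t
              rw [← hrdef, hr] at hh; simpa using hh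
            have hdc : d ≠ c := by simpa using hd
            have hcd : c < d := by
              have : d ∈ t := (List.dropWhile_sublist (fun x => x == c)).mem
                (by rw [← hrdef, hr]; simp)
              exact lt_of_le_of_ne (hle d this) (Ne.symm hdc)
            rw [hr] at hx
            rcases List.mem_cons.mp hx with h | h
            · exact h ▸ hdc
            · have hdx : d ≤ x := (List.pairwise_cons.mp (hr ▸ hrpw)).1 x h
              exact (ne_of_lt (lt_of_lt_of_le hcd hdx)).symm
        have hcr : r.count c = 0 := List.count_eq_zero.mpr (fun h => hrne c h rfl)
        have hctw : tw.count c = tw.length := by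
          conv_lhs => rw [hrep]
          simp
        have hcount_c : (c :: t).count c = tw.length + 1 := by
          have h1 : t.count c = tw.length := by
            rw [← htdr, List.count_append, hctw, hcr]
            omega
          simp [h1]
        have hcount_ne : ∀ x, x ≠ c → (c :: t).count x = r.count x := by
          intro x hxc
          have h0 : tw.count x = 0 := by
            conv_lhs => rw [hrep]
            simp [List.count_replicate, Ne.symm hxc]
          rw [List.count_cons_of_ne (Ne.symm hxc), ← htdr, List.count_append, h0]
          simp
        have hlen' : r.length ≤ n := by
          have h1 : r.length ≤ t.length := (List.dropWhile_sublist _).length_le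
          have h2 : t.length + 1 ≤ n + 1 := by simpa using hlen
          omega
        have IH := ih r hlen' hrpw
        have hm' : c :: t = c :: (List.replicate tw.length c ++ r) := by rw [← hrep, htdr]
        have hded : PySem.List.dedup (c :: t) = c :: PySem.List.dedup r := by
          rw [hm']; exact dedup_run c tw.length r (fun h => hrne c h rfl)
        have e2 : Gs t (i + 1) (some c) = Gs r (i + 1 + (tw.length : Int)) (some c) := by
          conv_lhs => rw [← htdr, hrep]
          rw [Gs_replicate]
        have L : Gs (c :: t) i none
            = (String.ofList [c], i) :: Hs (fun x => (r.count x : Int)) (PySem.List.dedup r)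
                (i + 1 + (tw.length : Int)) := by
          simp only [Gs, ne_eq, reduceCtorEq, not_false_eq_true, if_pos]
          rw [e2, Gs_fresh r c hrne, IH]
        have hcong : ∀ x ∈ PySem.List.dedup r, ((c :: t).count x : Int) = ((r.count x : Nat) : Int) := by
          intro x hx
          have hxr : x ∈ r := (PySem.Set.mem_ofList r x).mp hx
          rw [hcount_ne x (hrne x hxr)]
        rw [L, hded]
        simp only [Hs]
        rw [Hs_congr _ _ _ hcong]
        congr 2
        rw [hcount_c]
        push_cast
        ring

theorem Gs_eq_Hs (m : List Char) (hm : m.Pairwise (· ≤ ·)) :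
    ∀ i, Gs m i none = Hs (fun c => (m.count c : Int)) (PySem.List.dedup m) i :=
  fun i => Gs_eq_Hs_aux m.length m le_rfl hm i

-- unrolling port A's starts loop
theorem A_starts_unroll (m : List Char) : ∀ (i : Int) (d : PySem.Dict String Int) (last : Option Char),
    m.Pairwise (· ≤ ·) →
    (∀ x ∈ m, ∀ p, last = some p → p ≤ x) →
    (∀ x ∈ m, some x ≠ last → d.contains (String.ofList [x]) = false) →
    ((PySem.List.enumerate m i).foldl
      (fun (st : PySem.Dict String Int × Option Char) p =>
        if some p.2 ≠ st.2 then (st.1.insert (String.ofList [p.2]) p.1, some p.2) else st)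
      (d, last)).1.items = d.items ++ Gs m i last := by
  induction m with
  | nil => intro i d last _ _ _; simp [Gs, PySem.List.enumerate]
  | cons c t ih =>
      intro i d last hm hlb hfr
      have hle : ∀ x ∈ t, c ≤ x := (List.pairwise_cons.mp hm).1
      have ht : t.Pairwise (· ≤ ·) := (List.pairwise_cons.mp hm).2
      rw [PySem.List.enumerate_cons, List.foldl_cons]
      by_cases hcl : some c = last
      · subst hcl
        rw [if_neg (by simp)]
        rw [ih (i + 1) d (some c) ht
          (fun x hx p hp => hlb x (by simp [hx]) p hp)
          (fun x hx hne => hfr x (by simp [hx]) hne)]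
        simp [Gs]
      · have hfresh : d.contains (String.ofList [c]) = false :=
          hfr c (by simp) (by simpa using hcl)
        simp only [ne_eq, hcl, not_false_eq_true, if_pos]
        rw [ih (i + 1) (d.insert (String.ofList [c]) i) (some c) ht
          (fun x hx p hp => by
            have := hle x hx
            simpa [← Option.some_inj.mp hp.symm] using this)
          ?hfr']
        · rw [PySem.Dict.items_insert_of_not_contains d i hfresh]
          simp [Gs, hcl, List.append_assoc]
        case hfr' =>
          intro x hx hne
          have hxc : x ≠ c := by simpa using hne
          have h1 : (String.ofList [x] == String.ofList [c]) = false := by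
            simp only [beq_eq_false_iff_ne, ne_eq]
            exact fun h => hxc (ofList_single_inj h)
          rw [PySem.Dict.contains_insert]
          have hxl : some x ≠ last := by
            intro hxl
            rcases last with _ | p
            · simp at hxl
            · have hp : x = p := by simpa using hxl
              have h2 : p ≤ c := hlb c (by simp) p rfl
              have h3 : c ≤ x := hle x hx
              have h4 : x ≤ c := by rw [hp]; exact h2
              exact hxc (le_antisymm h4 h3)
          rw [h1, hfr x (by simp [hx]) hxl]
          rfl

-- unrolling port B's starts loop
theorem B_starts_unroll (cnt : Char → Int) (ks : List Char) :
    ∀ (i : Int) (d : PySem.Dict String Int), ks.Nodup →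
    (∀ x ∈ ks, d.contains (String.ofList [x]) = false) →
    (ks.foldl (fun (st : PySem.Dict String Int × Int) c =>
        (st.1.insert (String.ofList [c]) st.2, st.2 + cnt c)) (d, i)).1.items
      = d.items ++ Hs cnt ks i := by
  induction ks with
  | nil => intro i d _ _; simp [Hs]
  | cons c ks ih =>
      intro i d hnd hfr
      rw [List.foldl_cons]
      have hfresh : d.contains (String.ofList [c]) = false := hfr c (by simp)
      rw [ih (i + cnt c) (d.insert (String.ofList [c]) i) (List.nodup_cons.mp hnd).2 ?hfr']
      · rw [PySem.Dict.items_insert_of_not_contains d i hfresh]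
        simp [Hs, List.append_assoc]
      case hfr' =>
        intro x hx
        have hxc : x ≠ c := fun h => (List.nodup_cons.mp hnd).1 (h ▸ hx)
        rw [PySem.Dict.contains_insert]
        have h1 : (String.ofList [x] == String.ofList [c]) = false := by
          simp only [beq_eq_false_iff_ne, ne_eq]
          exact fun h => hxc (ofList_single_inj h)
        rw [h1, hfr x (by simp [hx])]
        rfl


-- ---- occurrence-table side ----

theorem items_ofList_nodup (ps : List (Int × Int)) (h : (ps.map Prod.fst).Nodup) :
    (PySem.Dict.ofList ps).items = ps := by
  have := PySem.Dict.items_foldl_insert_fresh ps Prod.fst Prod.snd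
    (PySem.Dict.empty : PySem.Dict Int Int) (fun a _ => PySem.Dict.contains_empty a.1) h
  simpa [PySem.Dict.ofList, PySem.Dict.update] using this

theorem nodup_pyRange (a b : Int) : (PySem.List.pyRange a b 1).Nodup := by
  rw [PySem.List.pyRange_of_pos a b (by norm_num)]
  refine List.Nodup.map ?_ List.nodup_range
  intro k1 k2 h
  simp at h
  exact_mod_cast h

-- the all-zero column {i: 0 for i in range(n+1)}
theorem zc_keys (n : Nat) :
    (PySem.Dict.ofList ((PySem.List.pyRange 0 ((n : Int) + 1) 1).map (fun i => (i, (0 : Int))))).keys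
      = PySem.List.pyRange 0 ((n : Int) + 1) 1 := by
  rw [PySem.Dict.keys, items_ofList_nodup]
  · simp [List.map_map, Function.comp_def]
  · simp [List.map_map]
    exact (nodup_pyRange 0 ((n : Int) + 1)).map (fun a b h => h)

theorem zc_getD (n : Nat) (j : Int) :
    (PySem.Dict.ofList ((PySem.List.pyRange 0 ((n : Int) + 1) 1).map (fun i => (i, (0 : Int))))).getD j 0
      = 0 := by
  have hkeys := zc_keys n
  by_cases hj : j ∈ PySem.List.pyRange 0 ((n : Int) + 1) 1
  · have hmemi : (j, (0 : Int)) ∈ (PySem.Dict.ofList ((PySem.List.pyRange 0 ((n : Int) + 1) 1).map (fun i => (i, (0 : Int))))).items := by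
      rw [items_ofList_nodup]
      · exact List.mem_map.mpr ⟨j, hj, rfl⟩
      · simp [List.map_map]
        exact (nodup_pyRange 0 ((n : Int) + 1)).map (fun a b h => h)
    exact PySem.Dict.getD_of_mem_items _ hmemi (by rw [hkeys]; exact nodup_pyRange _ _) 0
  · refine PySem.Dict.getD_of_not_contains _ 0 ?_
    by_contra h
    have := (PySem.Dict.contains_iff_mem_keys _ j).mp (by simpa using h)
    rw [hkeys] at this
    exact hj this

-- pointwise value of port A's inner per-character loop
theorem getD_foldl_cond_modify (x : String) (g : PySem.Dict Int Int → PySem.Dict Int Int)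
    (ks : List String) : ∀ (d : PySem.Dict String (PySem.Dict Int Int)), ks.Nodup → ∀ c',
    (ks.foldl (fun occ2 c => if c ≠ x then occ2.modify c PySem.Dict.empty g else occ2) d).getD c' PySem.Dict.empty
      = if c' ∈ ks ∧ c' ≠ x then g (d.getD c' PySem.Dict.empty) else d.getD c' PySem.Dict.empty := by
  induction ks with
  | nil => intro d _ c'; simp
  | cons k0 ks ih =>
      intro d hnd c'
      rw [List.foldl_cons]
      by_cases hP : k0 = x
      · rw [if_neg (by simp [hP])]
        rw [ih d (List.nodup_cons.mp hnd).2 c']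
        by_cases hc : c' = k0
        · subst hc; subst hP
          simp
        · simp [List.mem_cons, hc]
      · rw [if_pos hP]
        rw [ih _ (List.nodup_cons.mp hnd).2 c']
        by_cases hc : c' = k0
        · subst hc
          have hnin : c' ∉ ks := (List.nodup_cons.mp hnd).1
          rw [if_neg (by simp [hnin]), if_pos (by simp [hP])]
          rw [PySem.Dict.getD_modify]
          simp
        · rw [PySem.Dict.getD_modify_of_ne _ _ _ hc]
          simp [List.mem_cons, hc]

theorem keys_foldl_cond_modify (x : String) (g : PySem.Dict Int Int → PySem.Dict Int Int)
    (ks : List String) : ∀ (d : PySem.Dict String (PySem.Dict Int Int)), (∀ c ∈ ks, c ∈ d.keys) →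
    (ks.foldl (fun occ2 c => if c ≠ x then occ2.modify c PySem.Dict.empty g else occ2) d).keys = d.keys := by
  induction ks with
  | nil => intro d _; simp
  | cons k0 ks ih =>
      intro d hmem
      rw [List.foldl_cons]
      by_cases hP : k0 = x
      · rw [if_neg (by simp [hP])]
        exact ih d (fun c hc => hmem c (by simp [hc]))
      · rw [if_pos hP]
        have hk0 : (d.modify k0 PySem.Dict.empty g).keys = d.keys := by
          rw [PySem.Dict.keys_modify]
          exact PySem.Dict.keys_insert_of_contains d _
            ((PySem.Dict.contains_iff_mem_keys d k0).mpr (hmem k0 (by simp)))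
        rw [ih _ (fun c hc => by rw [hk0]; exact hmem c (by simp [hc])), hk0]

-- the invariant carried through port A's main loop
def Pinv (l : List Char) (D : List Char) (k : Nat) (occ : PySem.Dict String (PySem.Dict Int Int)) : Prop :=
  occ.keys = D.map (fun c => String.ofList [c]) ∧
  ∀ c ∈ D, (occ.getD (String.ofList [c]) PySem.Dict.empty).keys = PySem.List.pyRange 0 ((l.length : Int) + 1) 1 ∧
    ∀ j : Int, (occ.getD (String.ofList [c]) PySem.Dict.empty).getD j 0
      = if j ≤ (k : Int) then (((l.take j.toNat).count c : Nat) : Int) else 0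

theorem Pinv_occ0 (l : List Char) (D : List Char) (hD : D.Nodup) :
    Pinv l D 0 ((D.map (fun c => String.ofList [c])).foldl
      (fun d c => d.insert c (PySem.Dict.ofList
        ((PySem.List.pyRange 0 ((l.length : Int) + 1) 1).map (fun i => (i, (0 : Int))))))
      PySem.Dict.empty) := by
  have hSnd : (D.map (fun c => String.ofList [c])).Nodup :=
    hD.map (fun a b h => ofList_single_inj h)
  have hitems := PySem.Dict.items_foldl_insert_fresh (D.map (fun c => String.ofList [c]))
    (fun a => a)
    (fun _ => PySem.Dict.ofList ((PySem.List.pyRange 0 ((l.length : Int) + 1) 1).map (fun i => (i, (0 : Int)))))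
    PySem.Dict.empty (fun a _ => PySem.Dict.contains_empty a) (by simpa using hSnd)
  constructor
  · rw [PySem.Dict.keys, hitems]
    simp [List.map_map, Function.comp_def, PySem.Dict.empty]
  · intro c hc
    have hkeysnd : ((D.map (fun c => String.ofList [c])).foldl
        (fun d c => d.insert c (PySem.Dict.ofList
          ((PySem.List.pyRange 0 ((l.length : Int) + 1) 1).map (fun i => (i, (0 : Int))))))
        PySem.Dict.empty).keys.Nodup := by
      rw [PySem.Dict.keys, hitems]
      simpa [List.map_map, Function.comp_def, PySem.Dict.empty] using hSnd
    have hmemi : (String.ofList [c], PySem.Dict.ofList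
        ((PySem.List.pyRange 0 ((l.length : Int) + 1) 1).map (fun i => (i, (0 : Int))))) ∈
        ((D.map (fun c => String.ofList [c])).foldl
          (fun d c => d.insert c (PySem.Dict.ofList
            ((PySem.List.pyRange 0 ((l.length : Int) + 1) 1).map (fun i => (i, (0 : Int))))))
          PySem.Dict.empty).items := by
      rw [hitems]
      refine List.mem_append.mpr (Or.inr ?_)
      rw [List.map_map]
      exact List.mem_map.mpr ⟨c, hc, rfl⟩
    rw [PySem.Dict.getD_of_mem_items _ hmemi hkeysnd]
    refine ⟨zc_keys l.length, ?_⟩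
    intro j
    rw [zc_getD l.length j]
    split_ifs with hj
    · have hj0 : j.toNat = 0 := by omega
      simp [hj0]
    · rfl

theorem Pinv_step (l : List Char) (D : List Char) (hD : D.Nodup) (hmem : ∀ x ∈ l, x ∈ D)
    (k : Nat) (hk : k < l.length) (occ : PySem.Dict String (PySem.Dict Int Int))
    (hP : Pinv l D k occ) :
    Pinv l D (k + 1)
      ((fun (occ : PySem.Dict String (PySem.Dict Int Int)) (p : Int × Char) =>
        let occ1 := occ.modify (String.ofList [p.2]) PySem.Dict.empty
          (fun col => col.insert p.1 (col.getD (p.1 - 1) 0 + 1))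
        (D.map (fun c => String.ofList [c])).foldl
          (fun occ2 c =>
            if c ≠ String.ofList [p.2] then
              occ2.modify c PySem.Dict.empty (fun col => col.insert p.1 (col.getD (p.1 - 1) 0))
            else occ2) occ1) occ ((k : Int) + 1, l[k])) := by
  obtain ⟨hkeys, hcols⟩ := hP
  have hSnd : (D.map (fun c => String.ofList [c])).Nodup :=
    hD.map (fun a b h => ofList_single_inj h)
  have hxD : l[k] ∈ D := hmem l[k] (List.getElem_mem hk)
  have hxS : String.ofList [l[k]] ∈ D.map (fun c => String.ofList [c]) :=
    List.mem_map.mpr ⟨l[k], hxD, rfl⟩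
  have hocc1keys : (occ.modify (String.ofList [l[k]]) PySem.Dict.empty
      (fun col => col.insert ((k : Int) + 1) (col.getD ((k : Int) + 1 - 1) 0 + 1))).keys = occ.keys := by
    rw [PySem.Dict.keys_modify]
    exact PySem.Dict.keys_insert_of_contains occ _
      ((PySem.Dict.contains_iff_mem_keys occ _).mpr (by rw [hkeys]; exact hxS))
  constructor
  · simp only []
    rw [keys_foldl_cond_modify _ _ _ _ (fun c hc => by rw [hocc1keys, hkeys]; exact hc), hocc1keys, hkeys]
  · intro c hc
    simp only []
    rw [getD_foldl_cond_modify _ _ _ _ hSnd]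
    have hcS : String.ofList [c] ∈ D.map (fun c => String.ofList [c]) := List.mem_map.mpr ⟨c, hc, rfl⟩
    obtain ⟨hckeys, hcgetD⟩ := hcols c hc
    have htake : l.take (k + 1) = l.take k ++ [l[k]] := by
      rw [List.take_add_one, List.getElem?_eq_getElem hk]
      rfl
    by_cases hcx : c = l[k]
    · subst hcx
      rw [if_neg (by simp)]
      rw [PySem.Dict.getD_modify]
      rw [if_pos rfl]
      have hcont : ((occ.getD (String.ofList [l[k]]) PySem.Dict.empty).contains ((k : Int) + 1)) = true := by
        rw [PySem.Dict.contains_iff_mem_keys, hckeys, PySem.List.mem_pyRange_one]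
        omega
      constructor
      · rw [PySem.Dict.keys_insert_of_contains _ _ hcont, hckeys]
      · intro j
        rw [PySem.Dict.getD_insert]
        by_cases hj : j = (k : Int) + 1
        · subst hj
          rw [if_pos rfl, if_pos (by omega), hcgetD]
          rw [if_pos (by omega)]
          have h1 : ((k : Int) + 1 - 1).toNat = k := by omega
          have h2 : ((k : Int) + 1).toNat = k + 1 := by omega
          rw [h1, h2, htake]
          push_cast [List.count_append]
          simp
        · rw [if_neg hj, hcgetD]
          by_cases hjk : j ≤ (k : Int)
          · rw [if_pos hjk, if_pos (by omega)]
          · rw [if_neg hjk, if_neg (by omega)]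
    · have hmkne : String.ofList [c] ≠ String.ofList [l[k]] := fun h => hcx (ofList_single_inj h)
      rw [if_pos ⟨hcS, hmkne⟩]
      rw [PySem.Dict.getD_modify, if_neg hmkne]
      have hcont : ((occ.getD (String.ofList [c]) PySem.Dict.empty).contains ((k : Int) + 1)) = true := by
        rw [PySem.Dict.contains_iff_mem_keys, hckeys, PySem.List.mem_pyRange_one]
        omega
      constructor
      · rw [PySem.Dict.keys_insert_of_contains _ _ hcont, hckeys]
      · intro j
        rw [PySem.Dict.getD_insert]
        by_cases hj : j = (k : Int) + 1
        · subst hj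
          rw [if_pos rfl, if_pos (by omega), hcgetD]
          rw [if_pos (by omega)]
          have h1 : ((k : Int) + 1 - 1).toNat = k := by omega
          have h2 : ((k : Int) + 1).toNat = k + 1 := by omega
          rw [h1, h2, htake]
          have hz : List.count c [l[k]] = 0 := by
            refine List.count_eq_zero.mpr ?_
            simp [hcx]
          push_cast [List.count_append, hz]
          simp
        · rw [if_neg hj, hcgetD]
          by_cases hjk : j ≤ (k : Int)
          · rw [if_pos hjk, if_pos (by omega)]
          · rw [if_neg hjk, if_neg (by omega)]

theorem Pinv_fold (l : List Char) (D : List Char) (hD : D.Nodup) (hmem : ∀ x ∈ l, x ∈ D) :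
    ∀ k, k ≤ l.length →
    Pinv l D k ((PySem.List.enumerate (l.take k) 1).foldl
      (fun occ p =>
        let occ1 := occ.modify (String.ofList [p.2]) PySem.Dict.empty
          (fun col => col.insert p.1 (col.getD (p.1 - 1) 0 + 1))
        (D.map (fun c => String.ofList [c])).foldl
          (fun occ2 c =>
            if c ≠ String.ofList [p.2] then
              occ2.modify c PySem.Dict.empty (fun col => col.insert p.1 (col.getD (p.1 - 1) 0))
            else occ2) occ1)
      ((D.map (fun c => String.ofList [c])).foldl
        (fun d c => d.insert c (PySem.Dict.ofList
          ((PySem.List.pyRange 0 ((l.length : Int) + 1) 1).map (fun i => (i, (0 : Int))))))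
        PySem.Dict.empty)) := by
  intro k
  induction k with
  | zero =>
      intro _
      simpa [PySem.List.enumerate] using Pinv_occ0 l D hD
  | succ k ih =>
      intro hk1
      have hk : k < l.length := by omega
      have htake : l.take (k + 1) = l.take k ++ [l[k]] := by
        rw [List.take_add_one, List.getElem?_eq_getElem hk]
        rfl
      rw [htake, PySem.List.enumerate_append, List.foldl_append]
      have hlen : (l.take k).length = k := by
        rw [List.length_take]
        omega
      have hsingle : PySem.List.enumerate [l[k]] (1 + ((l.take k).length : Int))
          = [((k : Int) + 1, l[k])] := by
        rw [hlen, PySem.List.enumerate_cons, show (1 : Int) + (k : Int) = (k : Int) + 1 from by ring]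
        simp
      rw [hsingle, List.foldl_cons, List.foldl_nil]
      exact Pinv_step l D hD hmem k hk _ (ih (by omega))

-- what a dictionary satisfying the final invariant prints as
theorem Pinv_items (l : List Char) (D : List Char) (hD : D.Nodup)
    (occ : PySem.Dict String (PySem.Dict Int Int)) (hP : Pinv l D l.length occ) :
    occ.items.map (fun q => (q.1, q.2.items))
      = D.map (fun c => (String.ofList [c],
          (PySem.List.pyRange 0 ((l.length : Int) + 1) 1).map
            (fun j => (j, (((l.take j.toNat).count c : Nat) : Int))))) := by
  obtain ⟨hkeys, hcols⟩ := hP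
  have hSnd : (D.map (fun c => String.ofList [c])).Nodup :=
    hD.map (fun a b h => ofList_single_inj h)
  rw [PySem.Dict.items_eq_map_keys occ (by rw [hkeys]; exact hSnd) PySem.Dict.empty, hkeys,
    List.map_map, List.map_map]
  refine List.map_congr_left ?_
  intro c hc
  obtain ⟨hckeys, hcgetD⟩ := hcols c hc
  simp only [Function.comp_def]
  refine congrArg _ ?_
  rw [PySem.Dict.items_eq_map_keys _ (by rw [hckeys]; exact nodup_pyRange _ _) 0, hckeys]
  refine List.map_congr_left ?_
  intro j hj
  rw [PySem.List.mem_pyRange_one] at hj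
  rw [hcgetD j, if_pos (by omega)]

-- port B's single-character column
theorem B_col (l : List Char) (c : Char) : ∀ k, k ≤ l.length →
    (((PySem.List.enumerate (l.take k) 1).foldl
      (fun (q : PySem.Dict Int Int × Int) p =>
        let cnt := if String.ofList [p.2] = String.ofList [c] then q.2 + 1 else q.2
        (q.1.insert p.1 cnt, cnt))
      (PySem.Dict.ofList [((0 : Int), (0 : Int))], 0)).2 = (((l.take k).count c : Nat) : Int)) ∧
    ((PySem.List.enumerate (l.take k) 1).foldl
      (fun (q : PySem.Dict Int Int × Int) p =>
        let cnt := if String.ofList [p.2] = String.ofList [c] then q.2 + 1 else q.2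
        (q.1.insert p.1 cnt, cnt))
      (PySem.Dict.ofList [((0 : Int), (0 : Int))], 0)).1.items
      = (PySem.List.pyRange 0 ((k : Int) + 1) 1).map
          (fun j => (j, (((l.take j.toNat).count c : Nat) : Int))) := by
  intro k
  induction k with
  | zero =>
      intro _
      constructor
      · simp
      · simp only [List.take_zero, PySem.List.enumerate, List.foldl_nil]
        rw [items_ofList_nodup _ (by simp)]
        have h1 : PySem.List.pyRange 0 (((0 : Nat) : Int) + 1) 1 = [0] := by decide
        rw [h1]
        simp
  | succ k ih =>
      intro hk1
      have hk : k < l.length := by omega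
      obtain ⟨ihcnt, ihitems⟩ := ih (by omega)
      have htake : l.take (k + 1) = l.take k ++ [l[k]] := by
        rw [List.take_add_one, List.getElem?_eq_getElem hk]
        rfl
      have hlen : (l.take k).length = k := by
        rw [List.length_take]; omega
      have hsingle : PySem.List.enumerate [l[k]] (1 + ((l.take k).length : Int))
          = [((k : Int) + 1, l[k])] := by
        rw [hlen, PySem.List.enumerate_cons, show (1 : Int) + (k : Int) = (k : Int) + 1 from by ring]
        simp
      rw [htake, PySem.List.enumerate_append, List.foldl_append, hsingle,
        List.foldl_cons, List.foldl_nil]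
      have hcond : (String.ofList [l[k]] = String.ofList [c]) ↔ (l[k] = c) :=
        ⟨fun h => ofList_single_inj h, fun h => by rw [h]⟩
      have hcnt' : (if String.ofList [l[k]] = String.ofList [c]
            then (((l.take k).count c : Nat) : Int) + 1 else (((l.take k).count c : Nat) : Int))
          = (((l.take (k + 1)).count c : Nat) : Int) := by
        rw [htake]
        by_cases hx : l[k] = c
        · rw [if_pos (hcond.mpr hx)]
          push_cast [List.count_append, hx]
          simp
        · rw [if_neg (fun h => hx (hcond.mp h))]
          have hz : List.count c [l[k]] = 0 := by
            refine List.count_eq_zero.mpr ?_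
            simp
            exact fun h => hx h.symm
          push_cast [List.count_append, hz]
          ring
      have hfresh : ((((PySem.List.enumerate (l.take k) 1).foldl
          (fun (q : PySem.Dict Int Int × Int) p =>
            let cnt := if String.ofList [p.2] = String.ofList [c] then q.2 + 1 else q.2
            (q.1.insert p.1 cnt, cnt))
          (PySem.Dict.ofList [((0 : Int), (0 : Int))], 0)).1).contains ((k : Int) + 1)) = false := by
        rw [← Bool.not_eq_true, PySem.Dict.contains_iff_mem_keys, PySem.Dict.keys, ihitems,
          List.map_map]
        intro hmem
        rcases List.mem_map.mp hmem with ⟨j, hj, hjeq⟩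
        rw [PySem.List.mem_pyRange_one] at hj
        have : j = (k : Int) + 1 := by simpa using hjeq
        omega
      constructor
      · rw [← htake]
        simp only [ihcnt]
        exact hcnt'
      · simp only []
        rw [PySem.Dict.items_insert_of_not_contains _ _ hfresh, ihitems, ihcnt, hcnt']
        have h2 : PySem.List.pyRange 0 (((k + 1 : Nat) : Int) + 1) 1
            = PySem.List.pyRange 0 (((k : Nat) : Int) + 1) 1 ++ [((k : Nat) : Int) + 1] := by
          have := PySem.List.pyRange_one_succ_right (a := 0) (b := ((k : Nat) : Int) + 1) (by omega)
          push_cast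
          push_cast at this
          convert this using 2
        rw [h2, List.map_append]
        refine congrArg _ ?_
        have h3 : (((k : Nat) : Int) + 1).toNat = k + 1 := by omega
        simp [h3]


-- final assembly
theorem main_eq (bwt : String) : preprocess_bwt bwt = preprocess_bwt_alt bwt := by
  unfold preprocess_bwt preprocess_bwt_alt
  simp only []
  set l : List Char := bwt.toList with hldef
  set m : List Char := PySem.List.sorted l (fun c => c) false with hmdef
  have hm : m.Pairwise (· ≤ ·) := PySem.List.sorted_pairwise l (fun c => c)
  set D : List Char := PySem.List.dedup m with hDdef
  have hDnodup : D.Nodup := PySem.Set.nodup_ofList m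
  have hmemD : ∀ x ∈ l, x ∈ D := fun x hx =>
    (PySem.Set.mem_ofList m x).mpr ((PySem.List.sorted_perm l (fun c => c) false).mem_iff.mpr hx)
  have hperm : m.Perm l := PySem.List.sorted_perm l (fun c => c) false
  -- port A's starts
  have hAstarts : ((PySem.List.enumerate m 0).foldl
      (fun (st : PySem.Dict String Int × Option Char) p =>
        if some p.2 ≠ st.2 then (st.1.insert (String.ofList [p.2]) p.1, some p.2) else st)
      (PySem.Dict.empty, none)).1.items = Hs (fun c => (m.count c : Int)) D 0 := by
    rw [A_starts_unroll m 0 PySem.Dict.empty none hm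
      (fun x _ p hp => by cases hp)
      (fun x _ _ => PySem.Dict.contains_empty _)]
    rw [Gs_eq_Hs m hm 0]
    simp [PySem.Dict.empty]
    rfl
  -- port B's counter and sorted distinct characters
  have hcounter : l.foldl (fun d ch => d.insert ch (d.getD ch 0 + 1))
      (PySem.Dict.empty : PySem.Dict Char Int) = PySem.Dict.counter l :=
    PySem.Dict.foldl_insert_getD_add_one_eq_counter l
  have hks : PySem.List.sorted (PySem.Dict.counter l).keys (fun c => c) false = D := by
    rw [PySem.Dict.keys_counter]
    refine PySem.List.sorted_eq_of_perm_of_pairwise_lt _ _ _ ?_ (dedup_pairwise_lt m hm)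
    refine (List.perm_ext_iff_of_nodup hDnodup (PySem.Set.nodup_ofList l)).mpr ?_
    intro a
    rw [hDdef]
    show a ∈ PySem.Set.ofList m ↔ a ∈ PySem.Set.ofList l
    rw [PySem.Set.mem_ofList, PySem.Set.mem_ofList, hperm.mem_iff]
  -- port B's starts
  have hBstarts : (D.foldl
      (fun (st : PySem.Dict String Int × Int) c =>
        (st.1.insert (String.ofList [c]) st.2, st.2 + (PySem.Dict.counter l).getD c 0))
      (PySem.Dict.empty, 0)).1.items = Hs (fun c => (m.count c : Int)) D 0 := by
    rw [B_starts_unroll (fun c => (PySem.Dict.counter l).getD c 0) D 0 PySem.Dict.empty hDnodup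
      (fun x _ => PySem.Dict.contains_empty _)]
    rw [Hs_congr _ (fun c => (m.count c : Int)) D
      (fun c _ => by
        simp only [PySem.Dict.getD_counter]
        exact_mod_cast (hperm.count_eq c).symm)]
    simp [PySem.Dict.empty]
  rw [hcounter, hks]
  -- the common key list
  have hAkeys : ((PySem.List.enumerate m 0).foldl
      (fun (st : PySem.Dict String Int × Option Char) p =>
        if some p.2 ≠ st.2 then (st.1.insert (String.ofList [p.2]) p.1, some p.2) else st)
      (PySem.Dict.empty, none)).1.keys = D.map (fun c => String.ofList [c]) := by
    rw [PySem.Dict.keys, hAstarts, Hs_map_fst]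
  have hBkeys : (D.foldl
      (fun (st : PySem.Dict String Int × Int) c =>
        (st.1.insert (String.ofList [c]) st.2, st.2 + (PySem.Dict.counter l).getD c 0))
      (PySem.Dict.empty, 0)).1.keys = D.map (fun c => String.ofList [c]) := by
    rw [PySem.Dict.keys, hBstarts, Hs_map_fst]
  rw [hAkeys, hBkeys]
  refine Prod.ext ?_ ?_
  · rw [hAstarts, hBstarts]
  -- occurrence tables
  · have hAocc := Pinv_fold l D hDnodup hmemD l.length le_rfl
    rw [List.take_length] at hAocc
    have hAitems := Pinv_items l D hDnodup _ hAocc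
    simp only [] at hAitems
    rw [hAitems]
    -- port B's outer loop inserts fresh distinct keys
    have hSnd : (D.map (fun c => String.ofList [c])).Nodup :=
      hDnodup.map (fun a b h => ofList_single_inj h)
    have hBouter := PySem.Dict.items_foldl_insert_fresh (D.map (fun c => String.ofList [c]))
      (fun a => a)
      (fun cs => ((PySem.List.enumerate l 1).foldl
        (fun (q : PySem.Dict Int Int × Int) p =>
          let cnt := if String.ofList [p.2] = cs then q.2 + 1 else q.2
          (q.1.insert p.1 cnt, cnt))
        (PySem.Dict.ofList [((0 : Int), (0 : Int))], 0)).1)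
      PySem.Dict.empty (fun a _ => PySem.Dict.contains_empty a) (by simpa using hSnd)
    simp only [] at hBouter
    rw [hBouter]
    simp only [PySem.Dict.empty, List.nil_append, List.map_map]
    refine (List.map_congr_left ?_).symm
    intro c hc
    simp only [Function.comp_def]
    refine congrArg _ ?_
    have h := (B_col l c l.length le_rfl).2
    rw [List.take_length] at h
    simp only [] at h
    rw [h]


-- ===== VERDICT (by name: the statement is the Claim_ definition above) =====
theorem preprocess_bwt_spec : Claim_equal_preprocess_bwt := by
  intro bwt _
  unfold Spec_preprocess_bwt
  exact main_eq bwt
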